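-- pv_equiv track=rewrite | github.com/neochen2701/TQCPans | 程式設計：資料結構答案檔/Python/201.py | calculate_total_reward
-- ===== SOURCE A (Python) =====
-- def calculate_total_reward(tasks):
--     total_reward = 0
--     morning_tasks = 3
--     noon_tasks = 2
--     night_tasks = 1
--
--     i = 0
--     while i < len(tasks):
--         for _ in range(morning_tasks):
--             if i < len(tasks):
--                 total_reward += tasks[i] * 3
--                 i += 1
--         for _ in range(noon_tasks):
--             if i < len(tasks):
--                 total_reward += tasks[i] * 2
--                 i += 1
--         for _ in range(night_tasks):
--             if i < len(tasks):
--                 total_reward += tasks[i]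
--                 i += 1
--
--     return total_reward
-- ===== SOURCE B (Python) =====
-- W = (3, 3, 3, 2, 2, 1)
--
-- def calculate_total_reward(tasks):
--     total = 0
--     for i, t in enumerate(tasks):
--         total += t * W[i % 6]
--     return total
-- ===== Notes on version B (the rewrite author's own statement) =====
-- stated objective: simpler
-- what changed: Replaces the while loop with three phase sub-loops and morning/noon/night counters by a single flat pass that multiplies each task by a cyclic weight table entry W[i % 6].
import Mathlib
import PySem

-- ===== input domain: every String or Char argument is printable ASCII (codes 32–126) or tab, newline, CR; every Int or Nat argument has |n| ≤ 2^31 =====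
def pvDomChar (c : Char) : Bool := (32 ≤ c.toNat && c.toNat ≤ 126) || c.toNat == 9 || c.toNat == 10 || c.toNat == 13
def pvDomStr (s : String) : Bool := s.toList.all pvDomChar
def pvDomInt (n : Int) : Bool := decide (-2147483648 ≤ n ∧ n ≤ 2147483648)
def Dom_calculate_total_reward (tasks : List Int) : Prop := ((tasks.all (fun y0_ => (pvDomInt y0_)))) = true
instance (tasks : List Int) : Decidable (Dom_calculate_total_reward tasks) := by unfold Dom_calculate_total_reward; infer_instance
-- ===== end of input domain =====

-- B replaces A's while loop with three phase sub-loops and counters by one flat pass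
-- over a cyclic weight table W[i % 6] (objective: simpler).

-- ===== PORT A =====
-- one phase loop: 'for _ in range(n): if i < len(tasks): total += tasks[i] * w; i += 1'
def pvPhase (tasks : List Int) (w : Int) : Nat → Nat × Int → Nat × Int
  | 0, s => s
  | n + 1, (i, tot) =>
      if i < tasks.length then pvPhase tasks w n (i + 1, tot + tasks.getD i 0 * w)
      else pvPhase tasks w n (i, tot)

theorem pvPhase_fst_ge (tasks : List Int) (w : Int) (n : Nat) (s : Nat × Int) :
    s.1 ≤ (pvPhase tasks w n s).1 := by
  induction n generalizing s with
  | zero => simp [pvPhase]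
  | succ n ih =>
    obtain ⟨i, tot⟩ := s
    by_cases h : i < tasks.length <;> simp only [pvPhase, h, if_pos, if_neg, not_false_iff]
    · exact le_trans (by omega) (ih (i + 1, tot + tasks.getD i 0 * w))
    · simpa using ih (i, tot)

theorem pvPhase_fst_gt (tasks : List Int) (w : Int) (n : Nat) (i : Nat) (tot : Int)
    (h : i < tasks.length) : i < (pvPhase tasks w (n + 1) (i, tot)).1 := by
  have := pvPhase_fst_ge tasks w n (i + 1, tot + tasks.getD i 0 * w)
  simp only [pvPhase, h, if_pos] at *
  omega

-- the outer 'while i < len(tasks)' loop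
def pvLoop (tasks : List Int) (i : Nat) (tot : Int) : Int :=
  if h : i < tasks.length then
    let s1 := pvPhase tasks 3 3 (i, tot)       -- morning_tasks = 3, weight 3
    let s2 := pvPhase tasks 2 2 s1             -- noon_tasks = 2, weight 2
    let s3 := pvPhase tasks 1 1 s2             -- night_tasks = 1, weight 1
    pvLoop tasks s3.1 s3.2
  else tot
termination_by tasks.length - i
decreasing_by
  have h1 : i < (pvPhase tasks 3 3 (i, tot)).1 := pvPhase_fst_gt tasks 3 2 i tot h
  have h2 := pvPhase_fst_ge tasks 2 2 (pvPhase tasks 3 3 (i, tot))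
  have h3 := pvPhase_fst_ge tasks 1 1 (pvPhase tasks 2 2 (pvPhase tasks 3 3 (i, tot)))
  omega

def calculate_total_reward (tasks : List Int) : Int := pvLoop tasks 0 0

-- ===== PORT B =====
-- total = 0; for i, t in enumerate(tasks): total += t * W[i % 6]
def calculate_total_reward_alt (tasks : List Int) : Int :=
  (PySem.List.enumerate tasks 0).foldl
    (fun total p =>
      total + p.2 * PySem.List.pyGetD [3, 3, 3, 2, 2, 1] (PySem.Int.mod p.1 6) 0) 0

-- ===== PRECONDITION & SPEC =====
def Spec_calculate_total_reward (tasks : List Int) (out : Int) : Prop := out = calculate_total_reward_alt tasks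
instance (tasks : List Int) (out : Int) : Decidable (Spec_calculate_total_reward tasks out) := by unfold Spec_calculate_total_reward; infer_instance

-- ===== CLAIM (what is proved, stated in full; the proofs are below) =====
def Claim_equal_calculate_total_reward : Prop := ∀ (tasks : List Int), Dom_calculate_total_reward tasks → Spec_calculate_total_reward tasks (calculate_total_reward tasks)

-- ===== LEMMAS AND PROOFS =====

-- the cyclic weight at position j
def pvW (j : Nat) : Int := [(3:Int), 3, 3, 2, 2, 1].getD (j % 6) 0

-- weighted suffix sum  Σ_{j ≥ i} tasks[j] * pvW j
def pvSegSum (tasks : List Int) (i : Nat) : Int :=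
  if h : i < tasks.length then tasks.getD i 0 * pvW i + pvSegSum tasks (i + 1)
  else 0
termination_by tasks.length - i

theorem pvSegSum_of_ge (tasks : List Int) (i : Nat) (h : tasks.length ≤ i) :
    pvSegSum tasks i = 0 := by
  rw [pvSegSum]; simp [Nat.not_lt.mpr h]

-- a phase over a constant-weight stretch of the cycle computes a segment of pvSegSum
theorem pvPhase_eq (tasks : List Int) (w : Int) (n : Nat) :
    ∀ (i : Nat) (tot : Int), i ≤ tasks.length →
    (∀ j, i ≤ j → j < i + n → j < tasks.length → pvW j = w) →
    pvPhase tasks w n (i, tot)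
      = (min (i + n) tasks.length, tot + (pvSegSum tasks i - pvSegSum tasks (min (i + n) tasks.length))) := by
  induction n with
  | zero => intro i tot hi _; simp [pvPhase, Nat.min_eq_left hi]
  | succ n ih =>
    intro i tot hi hw
    by_cases h : i < tasks.length
    · simp only [pvPhase, h, if_pos]
      rw [ih (i + 1) _ (by omega) (fun j hj1 hj2 hjl => hw j (by omega) (by omega) hjl)]
      have hs : pvSegSum tasks i = tasks.getD i 0 * pvW i + pvSegSum tasks (i + 1) := by
        rw [pvSegSum]; simp [h]
      have hwi : pvW i = w := hw i (le_refl i) (by omega) h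
      rw [Prod.ext_iff]
      refine ⟨by simp; omega, ?_⟩
      have hmin : min (i + 1 + n) tasks.length = min (i + (n + 1)) tasks.length := by omega
      simp only [hmin]
      rw [hs, hwi]; ring
    · simp only [pvPhase, h, if_neg, not_false_iff]
      rw [ih i tot hi (fun j hj1 hj2 hjl => hw j (by omega) (by omega) hjl)]
      have : min (i + n) tasks.length = min (i + (n + 1)) tasks.length := by omega
      rw [this]

-- pvW is 3 / 2 / 1 on the three stretches of a block starting at a multiple of 6
theorem pvW_morning (j : Nat) (h : j % 6 < 3) : pvW j = 3 := by
  unfold pvW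
  have : j % 6 = 0 ∨ j % 6 = 1 ∨ j % 6 = 2 := by omega
  rcases this with h | h | h <;> simp [h]

theorem pvW_noon (j : Nat) (h3 : 3 ≤ j % 6) (h5 : j % 6 < 5) : pvW j = 2 := by
  unfold pvW
  have : j % 6 = 3 ∨ j % 6 = 4 := by omega
  rcases this with h | h <;> simp [h]

theorem pvW_night (j : Nat) (h : j % 6 = 5) : pvW j = 1 := by
  unfold pvW; simp [h]

-- A's outer loop, started at a block boundary, adds the weighted suffix sum
theorem pvLoop_eq (tasks : List Int) (i : Nat) (tot : Int)
    (hi : i ≤ tasks.length) (hm : i % 6 = 0) :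
    pvLoop tasks i tot = tot + pvSegSum tasks i := by
  by_cases h : i < tasks.length
  · rw [pvLoop]; simp only [h, dif_pos]
    rw [pvPhase_eq tasks 3 3 i tot hi (fun j hj1 hj2 hjl => pvW_morning j (by omega))]
    set i1 := min (i + 3) tasks.length with hi1
    have hi1le : i1 ≤ tasks.length := by omega
    rw [pvPhase_eq tasks 2 2 i1 _ hi1le (fun j hj1 hj2 hjl => pvW_noon j (by omega) (by omega))]
    set i2 := min (i1 + 2) tasks.length with hi2
    have hi2le : i2 ≤ tasks.length := by omega
    rw [pvPhase_eq tasks 1 1 i2 _ hi2le (fun j hj1 hj2 hjl => pvW_night j (by omega))]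
    set i3 := min (i2 + 1) tasks.length with hi3
    have hi3le : i3 ≤ tasks.length := by omega
    have : pvLoop tasks i3 (tot + (pvSegSum tasks i - pvSegSum tasks i1)
              + (pvSegSum tasks i1 - pvSegSum tasks i2)
              + (pvSegSum tasks i2 - pvSegSum tasks i3))
         = tot + (pvSegSum tasks i - pvSegSum tasks i1)
              + (pvSegSum tasks i1 - pvSegSum tasks i2)
              + (pvSegSum tasks i2 - pvSegSum tasks i3) + pvSegSum tasks i3 := by
      by_cases h3 : i3 < tasks.length
      · exact pvLoop_eq tasks i3 _ hi3le (by omega)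
      · rw [pvLoop]; simp only [h3, dif_neg, not_false_iff]
        rw [pvSegSum_of_ge tasks i3 (by omega)]; ring
    rw [this]; ring
  · rw [pvLoop]; simp only [h, dif_neg, not_false_iff]
    rw [pvSegSum_of_ge tasks i (by omega)]; ring
termination_by tasks.length - i
decreasing_by omega

-- structural version of the weighted sum
def pvSegSum' : List Int → Nat → Int
  | [], _ => 0
  | t :: r, k => t * pvW k + pvSegSum' r (k + 1)

-- B's fold over enumerate, started at any position, adds the same weighted sum
theorem pvFold_eq (l : List Int) : ∀ (k : Nat) (acc : Int),
    (PySem.List.enumerate l (k : Int)).foldl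
      (fun total p =>
        total + p.2 * PySem.List.pyGetD [3, 3, 3, 2, 2, 1] (PySem.Int.mod p.1 6) 0) acc
    = acc + pvSegSum' l k := by
  induction l with
  | nil => intro k acc; simp [PySem.List.enumerate_nil, pvSegSum']
  | cons t rest ih =>
    intro k acc
    rw [PySem.List.enumerate_cons]
    simp only [List.foldl_cons]
    have hcast : (k : Int) + 1 = ((k + 1 : Nat) : Int) := by push_cast; ring
    rw [hcast, ih (k + 1)]
    have hmod : PySem.Int.mod (k : Int) 6 = ((k % 6 : Nat) : Int) := by
      exact_mod_cast PySem.Int.mod_natCast k 6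
    rw [hmod]
    simp only [pvSegSum', PySem.List.pyGetD_natCast, pvW]
    ring

theorem pvSegSum_eq_segSum' (tasks : List Int) : ∀ (i : Nat),
    pvSegSum tasks i = pvSegSum' (tasks.drop i) i := by
  intro i
  by_cases h : i < tasks.length
  · rw [pvSegSum]
    have hd : tasks.drop i = tasks[i] :: tasks.drop (i + 1) :=
      List.drop_eq_getElem_cons h
    rw [hd]
    simp only [h, dif_pos, pvSegSum']
    rw [pvSegSum_eq_segSum' tasks (i + 1)]
    simp [List.getD_eq_getElem?_getD, List.getElem?_eq_getElem h]
  · rw [pvSegSum_of_ge tasks i (by omega)]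
    rw [List.drop_eq_nil_of_le (by omega)]
    rfl
termination_by i => tasks.length - i
decreasing_by omega

-- ===== VERDICT (by name: the statement is the Claim_ definition above) =====
theorem calculate_total_reward_spec : Claim_equal_calculate_total_reward := by
  intro tasks _
  unfold Spec_calculate_total_reward calculate_total_reward calculate_total_reward_alt
  have hA : pvLoop tasks 0 0 = 0 + pvSegSum tasks 0 :=
    pvLoop_eq tasks 0 0 (Nat.zero_le _) rfl
  have hB := pvFold_eq tasks 0 0
  simp only [Nat.cast_zero] at hB
  rw [hA, hB, pvSegSum_eq_segSum' tasks 0, List.drop_zero]
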